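-- pv_equiv track=rewrite | github.com/tawhid-k/python-practice | 1st Round/3rd Phase/1st.py | repetition
-- ===== SOURCE A (Python) =====
-- def repetition(arr):
--     thisset = set()
--     occ = []
--     for i in arr:
--         thisset.add(i)
--     for i in thisset:
--         counter = 0
--         for j in arr:
--             if j == i:
--                 counter += 1
--         if counter in occ:
--             return True
--         elif counter > 1:
--             occ.append(counter)
--     return False
-- ===== SOURCE B (Python) =====
-- def repetition(arr):
--     counts = {}
--     for x in arr:
--         counts[x] = counts.get(x, 0) + 1
--     freq = {}
--     for c in counts.values():
--         if c > 1:
--             freq[c] = freq.get(c, 0) + 1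
--     return any(v >= 2 for v in freq.values())
-- ===== Notes on version B (the rewrite author's own statement) =====
-- stated objective: faster
-- what changed: Replaces A's per-distinct-element rescans of the whole list with a running occurrence list and early return by two one-pass frequency tables (counts per value, then a tally of repeated counts) and a final threshold check.
import Mathlib
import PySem

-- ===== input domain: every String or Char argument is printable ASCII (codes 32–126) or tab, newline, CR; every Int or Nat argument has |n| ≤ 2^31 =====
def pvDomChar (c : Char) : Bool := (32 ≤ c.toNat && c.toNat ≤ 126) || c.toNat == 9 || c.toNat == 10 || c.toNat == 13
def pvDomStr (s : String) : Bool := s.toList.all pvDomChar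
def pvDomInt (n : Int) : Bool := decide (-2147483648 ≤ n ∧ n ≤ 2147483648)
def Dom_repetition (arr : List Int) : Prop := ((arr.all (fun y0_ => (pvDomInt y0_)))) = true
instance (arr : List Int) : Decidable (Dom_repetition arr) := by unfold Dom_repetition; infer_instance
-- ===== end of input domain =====

-- B replaces A's per-distinct-element rescans + running occurrence list by two one-pass
-- frequency tables and a threshold check, removing the repeated whole-list rescans (objective: faster).

-- ===== PORT A =====
-- the loop 'for i in thisset: … return True / occ.append …'; the inner 'for j in arr' count
-- is the foldl.  (Python's set iteration order is hash order; the result here is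
-- order-independent, so iterating the PySem.Set's element list is exact.)
def repetitionGo (arr : List Int) : List Int → List Int → Bool
  | [], _ => false
  | i :: rest, occ =>
    let counter := arr.foldl (fun c j => if j == i then c + 1 else c) (0 : Int)
    if occ.contains counter then true
    else if counter > 1 then repetitionGo arr rest (occ ++ [counter])
    else repetitionGo arr rest occ

def repetition (arr : List Int) : Bool :=
  repetitionGo arr (PySem.Set.ofList arr) []

-- ===== PORT B =====
def repetition_alt (arr : List Int) : Bool :=
  let counts := arr.foldl (fun d x => d.insert x (d.getD x 0 + 1)) (PySem.Dict.empty : PySem.Dict Int Int)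
  let freq := counts.values.foldl
    (fun d c => if c > 1 then d.insert c (d.getD c 0 + 1) else d)
    (PySem.Dict.empty : PySem.Dict Int Int)
  freq.values.any (fun v => v ≥ 2)

-- ===== PRECONDITION & SPEC =====
def Spec_repetition (arr : List Int) (out : Bool) : Prop := out = repetition_alt arr
instance (arr : List Int) (out : Bool) : Decidable (Spec_repetition arr out) := by unfold Spec_repetition; infer_instance

-- ===== CLAIM (what is proved, stated in full; the proofs are below) =====
def Claim_equal_repetition : Prop := ∀ (arr : List Int), Dom_repetition arr → Spec_repetition arr (repetition arr)

-- ===== LEMMAS AND PROOFS =====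

-- the repeated-count list both programs effectively look at
def pvKey (arr : List Int) : List Int :=
  ((PySem.Set.ofList arr).map (fun i => (arr.count i : Int))).filter (fun c => 1 < c)

lemma foldl_count (arr : List Int) (i : Int) (c : Int) :
    arr.foldl (fun c j => if j == i then c + 1 else c) c = c + arr.count i := by
  induction arr generalizing c with
  | nil => simp
  | cons a t ih =>
    simp only [List.foldl_cons, List.count_cons, ih]
    by_cases h : a = i <;> simp [h, beq_iff_eq] <;> ring

lemma go_eq (arr : List Int) : ∀ (l occ : List Int), occ.Nodup → (∀ c ∈ occ, 1 < c) →
    repetitionGo arr l occ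
      = !(occ ++ (l.map (fun i => (arr.count i : Int))).filter (fun c => 1 < c)).Nodup := by
  intro l
  induction l with
  | nil => intro occ h1 _; simp [repetitionGo, h1]
  | cons i rest ih =>
    intro occ hnd hgt
    simp only [repetitionGo, foldl_count, zero_add]
    by_cases hmem : (arr.count i : Int) ∈ occ
    · have hgt1 : (1 : Int) < arr.count i := hgt _ hmem
      simp [List.contains_iff_mem, hmem, List.map_cons, hgt1, List.nodup_append]
      exact Or.inr (Or.inr ⟨_, hmem, fun h => absurd rfl h⟩)
    · by_cases hgt1 : (1 : Int) < arr.count i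
      · have : ¬ (arr.count i : Int) > 1 → False := fun h => h hgt1
        simp only [List.contains_iff_mem, hmem, decide_false, Bool.false_eq_true, if_false,
          gt_iff_lt, hgt1, if_true]
        rw [ih (occ ++ [(arr.count i : Int)])
            (by simp [List.nodup_append, hnd]
                exact fun a ha h => hmem (h ▸ ha))
            (by intro c hc; rcases List.mem_append.1 hc with h | h
                · exact hgt _ h
                · simp at h; simpa [h] using hgt1)]
        simp [List.filter_cons, hgt1, List.append_assoc]
      · simp only [List.contains_iff_mem, hmem, decide_false, Bool.false_eq_true, if_false,
          gt_iff_lt, hgt1, if_false]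
        rw [ih occ hnd hgt]
        simp [List.filter_cons, hgt1]

lemma repetition_eq_key (arr : List Int) : repetition arr = !(pvKey arr).Nodup := by
  rw [repetition, go_eq arr _ [] List.nodup_nil (by simp)]
  simp [pvKey]

lemma foldl_if_filter (f : PySem.Dict Int Int → Int → PySem.Dict Int Int) :
    ∀ (l : List Int) (d : PySem.Dict Int Int),
      l.foldl (fun d c => if c > 1 then f d c else d) d
        = (l.filter (fun c => c > 1)).foldl f d := by
  intro l
  induction l with
  | nil => intro d; rfl
  | cons a t ih =>
    intro d
    by_cases h : a > 1 <;> simp [List.filter_cons, h, ih]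

lemma alt_eq_key (arr : List Int) : repetition_alt arr = !(pvKey arr).Nodup := by
  rw [repetition_alt]
  simp only [PySem.Dict.foldl_insert_getD_add_one_eq_counter]
  have hvals : (PySem.Dict.counter arr).values
      = (PySem.Set.ofList arr).map (fun i => (arr.count i : Int)) := by
    show ((PySem.Dict.counter arr).items.map (·.2)) = _
    rw [PySem.Dict.items_counter]
    simp [Function.comp]
  rw [hvals]
  rw [foldl_if_filter (fun d c => d.insert c (d.getD c 0 + 1))]
  have : ((PySem.Set.ofList arr).map (fun i => (arr.count i : Int))).filter (fun c => c > 1)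
      = pvKey arr := by
    simp [pvKey, gt_iff_lt]
  rw [this]
  rw [PySem.Dict.foldl_insert_getD_add_one_eq_counter]
  -- values of counter L, any ≥ 2  ↔  L has a duplicate
  set L := pvKey arr with hL
  have hv : (PySem.Dict.counter L).values
      = (PySem.Set.ofList L).map (fun c => (L.count c : Int)) := by
    show ((PySem.Dict.counter L).items.map (·.2)) = _
    rw [PySem.Dict.items_counter]
    simp [Function.comp]
  rw [hv]
  rcases h : decide (L.Nodup) with _ | _
  · have hnd : ¬ L.Nodup := of_decide_eq_false h
    rw [List.nodup_iff_count_le_one] at hnd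
    push_neg at hnd
    obtain ⟨a, ha⟩ := hnd
    have hmemL : a ∈ L := by
      by_contra hm
      simp [List.count_eq_zero_of_not_mem hm] at ha
    simp only [Bool.not_false, List.any_eq_true, List.mem_map]
    refine ⟨(L.count a : Int), ⟨a, ?_, rfl⟩, by simp only [decide_eq_true_eq]; exact_mod_cast ha⟩
    simpa [PySem.Set.mem_ofList] using hmemL
  · have hnd : L.Nodup := of_decide_eq_true h
    simp only [Bool.not_true, List.any_eq_false, List.mem_map, ge_iff_le]
    rintro v ⟨a, ha, rfl⟩
    have hle : L.count a ≤ 1 := List.nodup_iff_count_le_one.1 hnd a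
    simp only [decide_eq_true_eq, not_le]
    exact_mod_cast Nat.lt_succ_of_le hle

-- ===== VERDICT (by name: the statement is the Claim_ definition above) =====
theorem repetition_spec : Claim_equal_repetition := by
  intro arr _
  show repetition arr = repetition_alt arr
  rw [repetition_eq_key, alt_eq_key]
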